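-- pv_equiv track=rewrite | github.com/ssssbug/FootPlanGPT | app/memory/WorkingMemory.py | extract_key_sentence
-- ===== SOURCE A (Python) =====
-- def extract_key_sentence(content:str, keyword_str:str)->str:
--     """提取包含关键词的关键句子"""
--     sentences = content.split(".")
--
--     for sentence in sentences:
--         if any(keyword in sentence for keyword in keyword_str.split(",")):
--             cleaned = sentence.strip()
--             if 20<=len(cleaned)<=150:#合理的句子长度
--                 return cleaned+"."
--
--
--     #返回第一个完整的句子
--     for sentence in sentences:
--         cleaned = sentence.strip()
--         if len(cleaned)>=10:
--             return cleaned[:100]+("..." if len(cleaned)>=100 else "")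
--     return content[:100]+"..." if len(content)>=100 else content
-- ===== SOURCE B (Python) =====
-- def extract_key_sentence(content: str, keyword_str: str) -> str:
--     """Single fused pass: keyword hit returns immediately; first long-enough
--     sentence is remembered as the fallback candidate."""
--     keywords = keyword_str.split(",")
--     fallback = None
--     for sentence in content.split("."):
--         cleaned = sentence.strip()
--         if 20 <= len(cleaned) <= 150 and any(k in sentence for k in keywords):
--             return cleaned + "."
--         if fallback is None and len(cleaned) >= 10:
--             fallback = cleaned
--     if fallback is not None:
--         return fallback[:100] + ("..." if len(fallback) >= 100 else "")
--     return content[:100] + "..." if len(content) >= 100 else content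
-- ===== Notes on version B (the rewrite author's own statement) =====
-- stated objective: simpler
-- what changed: B replaces A's two sequential scans of content.split('.') with a single fused pass that returns immediately on a keyword sentence of valid length and remembers the first stripped sentence of length >= 10 as the fallback candidate.
import Mathlib
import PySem

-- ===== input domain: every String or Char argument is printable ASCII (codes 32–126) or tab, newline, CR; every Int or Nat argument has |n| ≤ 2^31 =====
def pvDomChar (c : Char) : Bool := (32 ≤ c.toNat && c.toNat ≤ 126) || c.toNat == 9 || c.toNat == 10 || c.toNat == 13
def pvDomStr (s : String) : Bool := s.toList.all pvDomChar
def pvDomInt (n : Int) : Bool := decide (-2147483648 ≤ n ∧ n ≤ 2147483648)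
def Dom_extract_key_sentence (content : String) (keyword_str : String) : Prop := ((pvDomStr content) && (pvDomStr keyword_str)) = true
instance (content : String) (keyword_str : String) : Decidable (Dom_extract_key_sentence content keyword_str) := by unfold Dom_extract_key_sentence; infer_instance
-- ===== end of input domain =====

-- B fuses A's two scans over content.split('.') into one pass that records the
-- first 'len(strip)>=10' fallback while searching for a keyword sentence
-- (objective: simpler — one traversal, one strip per sentence).

-- ===== PORT A =====
-- first loop of A: first sentence containing a keyword whose strip has length in [20,150]
def pvALoop1 (kws : List (List Char)) : List (List Char) → Option (List Char)
  | [] => none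
  | s :: rest =>
    if kws.any (fun k => PySem.Chars.isIn k s) then
      let cleaned := PySem.Chars.strip s
      if 20 ≤ cleaned.length && cleaned.length ≤ 150 then
        some (cleaned ++ ['.'])
      else pvALoop1 kws rest
    else pvALoop1 kws rest

-- second loop of A: first sentence whose strip has length ≥ 10, formatted
def pvALoop2 : List (List Char) → Option (List Char)
  | [] => none
  | s :: rest =>
    let cleaned := PySem.Chars.strip s
    if 10 ≤ cleaned.length then
      some (cleaned.take 100 ++ (if 100 ≤ cleaned.length then "...".toList else []))
    else pvALoop2 rest

def extract_key_sentence (content : String) (keyword_str : String) : String :=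
  let sentences := PySem.Chars.splitOn content.toList ['.']
  let kws := PySem.Chars.splitOn keyword_str.toList [',']
  match pvALoop1 kws sentences with
  | some r => String.ofList r
  | none =>
    match pvALoop2 sentences with
    | some r => String.ofList r
    | none =>
      if 100 ≤ content.toList.length then
        String.ofList (content.toList.take 100 ++ "...".toList)
      else content

-- ===== PORT B =====
-- single pass: Sum.inl = keyword sentence found (formatted); Sum.inr fb = pass
-- finished with fallback candidate fb (the first cleaned sentence of length ≥ 10)
def pvBLoop (kws : List (List Char)) : List (List Char) → Option (List Char) →
    (List Char) ⊕ (Option (List Char))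
  | [], fb => Sum.inr fb
  | s :: rest, fb =>
    let cleaned := PySem.Chars.strip s
    if (20 ≤ cleaned.length && cleaned.length ≤ 150)
        && kws.any (fun k => PySem.Chars.isIn k s) then
      Sum.inl (cleaned ++ ['.'])
    else
      pvBLoop kws rest (if fb.isNone && 10 ≤ cleaned.length then some cleaned else fb)

def extract_key_sentence_alt (content : String) (keyword_str : String) : String :=
  let kws := PySem.Chars.splitOn keyword_str.toList [',']
  match pvBLoop kws (PySem.Chars.splitOn content.toList ['.']) none with
  | Sum.inl r => String.ofList r
  | Sum.inr (some fb) =>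
    String.ofList (fb.take 100 ++ (if 100 ≤ fb.length then "...".toList else []))
  | Sum.inr none =>
    if 100 ≤ content.toList.length then
      String.ofList (content.toList.take 100 ++ "...".toList)
    else content

-- ===== PRECONDITION & SPEC =====
def Spec_extract_key_sentence (content : String) (keyword_str : String) (out : String) : Prop := out = extract_key_sentence_alt content keyword_str
instance (content : String) (keyword_str : String) (out : String) : Decidable (Spec_extract_key_sentence content keyword_str out) := by unfold Spec_extract_key_sentence; infer_instance

-- ===== CLAIM (what is proved, stated in full; the proofs are below) =====
def Claim_equal_extract_key_sentence : Prop := ∀ (content : String) (keyword_str : String), Dom_extract_key_sentence content keyword_str → Spec_extract_key_sentence content keyword_str (extract_key_sentence content keyword_str)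

-- ===== LEMMAS AND PROOFS =====

-- the raw fallback candidate A's second loop selects (before formatting)
def pvFirstFb : List (List Char) → Option (List Char)
  | [] => none
  | s :: rest =>
    let cleaned := PySem.Chars.strip s
    if 10 ≤ cleaned.length then some cleaned else pvFirstFb rest

theorem pvALoop2_eq_firstFb (ss : List (List Char)) :
    pvALoop2 ss = (pvFirstFb ss).map
      (fun fb => fb.take 100 ++ (if 100 ≤ fb.length then "...".toList else [])) := by
  induction ss with
  | nil => rfl
  | cons s rest ih =>
    simp only [pvALoop2, pvFirstFb]
    by_cases h : 10 ≤ (PySem.Chars.strip s).length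
    · simp [h]
    · simp [h, ih]

theorem pvBLoop_eq (kws : List (List Char)) (ss : List (List Char))
    (fb : Option (List Char)) :
    pvBLoop kws ss fb =
      match pvALoop1 kws ss with
      | some r => Sum.inl r
      | none => Sum.inr (match fb with | some f => some f | none => pvFirstFb ss) := by
  induction ss generalizing fb with
  | nil => cases fb <;> rfl
  | cons s rest ih =>
    by_cases hk : (kws.any (fun k => PySem.Chars.isIn k s)) = true
    · by_cases hl : (20 ≤ (PySem.Chars.strip s).length &&
          (PySem.Chars.strip s).length ≤ 150) = true
      · simp [pvBLoop, pvALoop1, hk, hl]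
      · have hP : ¬(20 ≤ (PySem.Chars.strip s).length ∧
            (PySem.Chars.strip s).length ≤ 150) := by
          intro h; exact hl (by simp [h.1, h.2])
        cases fb with
        | some f => simp [pvBLoop, pvALoop1, hk, hP, ih]
        | none =>
          by_cases h10 : 10 ≤ (PySem.Chars.strip s).length
          · simp [pvBLoop, pvALoop1, pvFirstFb, hk, hP, h10, ih]
          · simp [pvBLoop, pvALoop1, pvFirstFb, hk, hP, h10, ih]
    · cases fb with
      | some f => simp [pvBLoop, pvALoop1, hk, ih]
      | none =>
        by_cases h10 : 10 ≤ (PySem.Chars.strip s).length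
        · simp [pvBLoop, pvALoop1, pvFirstFb, hk, h10, ih]
        · simp [pvBLoop, pvALoop1, pvFirstFb, hk, h10, ih]

-- ===== VERDICT (by name: the statement is the Claim_ definition above) =====
theorem extract_key_sentence_spec : Claim_equal_extract_key_sentence := by
  intro content keyword_str _
  unfold Spec_extract_key_sentence
  simp only [extract_key_sentence, extract_key_sentence_alt, pvBLoop_eq,
    pvALoop2_eq_firstFb]
  cases pvALoop1 (PySem.Chars.splitOn keyword_str.toList [','])
      (PySem.Chars.splitOn content.toList ['.']) with
  | some r => rfl
  | none =>
    cases pvFirstFb (PySem.Chars.splitOn content.toList ['.']) with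
    | some fb => rfl
    | none => rfl
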